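-- pv_equiv track=rewrite | github.com/Chad-Mowbray/iamb-classifier | iambic_line_processors/demote_combinations_graph.py | get_word_combinations
-- ===== SOURCE A (Python) =====
-- import itertools
--
-- def get_word_combinations(word, primary_stress_idxs):
--     possible_words = []
--     for possible in itertools.product([2, 1],repeat=len(primary_stress_idxs)):
--         word_copy = [s for s in word]
--         for i,p in enumerate(possible):
--             for j,s in enumerate(word_copy):
--                 if j != primary_stress_idxs[i]:
--                     word_copy[j] = s
--                 else:
--                     word_copy[j] = p
--         possible_words.append(word_copy)
--     return possible_words
-- ===== SOURCE B (Python) =====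
-- def get_word_combinations(word, primary_stress_idxs):
--     results = []
--     assign = {}
--
--     def go(k):
--         if k == len(primary_stress_idxs):
--             results.append([assign.get(j, s) for j, s in enumerate(word)])
--         else:
--             for p in (2, 1):
--                 assign[primary_stress_idxs[k]] = p
--                 go(k + 1)
--
--     go(0)
--     return results
-- ===== Notes on version B (the rewrite author's own statement) =====
-- stated objective: faster
-- what changed: Replaces the itertools.product driver, which rewrites the whole word once per stress index for every combination, by a recursive depth-first backtracking enumeration that keeps a dict of index choices and builds each row once at the leaf.
import Mathlib
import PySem

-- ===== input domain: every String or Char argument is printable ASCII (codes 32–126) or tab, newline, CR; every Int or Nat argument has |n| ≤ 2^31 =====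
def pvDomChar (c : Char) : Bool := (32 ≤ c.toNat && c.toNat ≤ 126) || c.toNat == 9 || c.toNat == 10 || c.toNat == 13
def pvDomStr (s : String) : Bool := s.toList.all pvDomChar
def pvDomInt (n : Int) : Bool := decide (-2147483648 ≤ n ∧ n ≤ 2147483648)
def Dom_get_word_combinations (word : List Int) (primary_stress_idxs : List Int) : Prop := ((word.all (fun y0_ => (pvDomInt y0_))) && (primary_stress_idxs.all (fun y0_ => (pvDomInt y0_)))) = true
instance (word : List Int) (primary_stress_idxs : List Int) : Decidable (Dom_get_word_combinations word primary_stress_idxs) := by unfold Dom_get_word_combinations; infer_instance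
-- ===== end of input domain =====

-- B replaces the itertools.product driver with a recursive depth-first backtracking
-- enumeration over the stress indices (dict of choices, row built at each leaf); same output.


-- ===== PORT A =====
-- itertools.product([2, 1], repeat=n) in Python's order (leftmost coordinate varies slowest)
def pvProdRep : Nat → List (List Int)
  | 0 => [[]]
  | n + 1 => ([2, 1] : List Int).flatMap (fun p => (pvProdRep n).map (fun t => p :: t))

-- body of the inner 'for j,s in enumerate(word_copy)' rewrite for one (i, p) of enumerate(possible);
-- primary_stress_idxs[i] is always in range here (i < len(possible) = len(primary_stress_idxs)),
-- so the total pyGetD form is exact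
def pvAStep (primary_stress_idxs : List Int) (word_copy : List Int) (ip : Int × Int) : List Int :=
  (PySem.List.enumerate word_copy).map
    (fun js => if js.1 ≠ PySem.List.pyGetD primary_stress_idxs ip.1 0 then js.2 else ip.2)

def get_word_combinations (word : List Int) (primary_stress_idxs : List Int) : List (List Int) :=
  (pvProdRep primary_stress_idxs.length).foldl
    (fun possible_words possible =>
      possible_words ++
        [(PySem.List.enumerate possible).foldl (pvAStep primary_stress_idxs)
          (word.map (fun s => s))])
    []

-- ===== PORT B =====
-- recursion of Source B's go: k ↦ the remaining suffix of primary_stress_idxs; the mutable dict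
-- 'assign' becomes a functional accumulator (every live key is overwritten on the current path
-- before the leaf reads it, so the lookups agree with the mutated dict); appends to the shared
-- results list become concatenation of the two recursive results
def pvGo (word : List Int) (rest : List Int) (assign : PySem.Dict Int Int) : List (List Int) :=
  match rest with
  | [] => [(PySem.List.enumerate word).map (fun js => assign.getD js.1 js.2)]
  | idx :: rest' => pvGo word rest' (assign.insert idx 2) ++ pvGo word rest' (assign.insert idx 1)

def get_word_combinations_alt (word : List Int) (primary_stress_idxs : List Int) : List (List Int) :=
  pvGo word primary_stress_idxs PySem.Dict.empty

-- ===== PRECONDITION & SPEC =====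
def Spec_get_word_combinations (word : List Int) (primary_stress_idxs : List Int) (out : List (List Int)) : Prop := out = get_word_combinations_alt word primary_stress_idxs
instance (word : List Int) (primary_stress_idxs : List Int) (out : List (List Int)) : Decidable (Spec_get_word_combinations word primary_stress_idxs out) := by unfold Spec_get_word_combinations; infer_instance

-- ===== CLAIM (what is proved, stated in full; the proofs are below) =====
def Claim_equal_get_word_combinations : Prop := ∀ (word : List Int) (primary_stress_idxs : List Int), Dom_get_word_combinations word primary_stress_idxs → Spec_get_word_combinations word primary_stress_idxs (get_word_combinations word primary_stress_idxs)

-- ===== LEMMAS AND PROOFS =====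

-- the row determined by a choice dict d over base word w
def pvRow (d : PySem.Dict Int Int) (w : List Int) : List Int :=
  (PySem.List.enumerate w).map (fun js => d.getD js.1 js.2)

-- one rewrite pass of A, abstracted over the (index-value, choice) pair
def pvStep2 (wc : List Int) (q : Int × Int) : List Int :=
  (PySem.List.enumerate wc).map (fun js => if js.1 ≠ q.1 then js.2 else q.2)

def pvInsertAll (d : PySem.Dict Int Int) (pairs : List (Int × Int)) : PySem.Dict Int Int :=
  pairs.foldl (fun d q => d.insert q.1 q.2) d

lemma pvStep2_row (d : PySem.Dict Int Int) (w : List Int) (q : Int × Int) :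
    pvStep2 (pvRow d w) q = pvRow (d.insert q.1 q.2) w := by
  simp only [pvStep2, pvRow]
  apply List.ext_getElem
  · simp [PySem.List.length_enumerate]
  · intro k h1 h2
    simp [PySem.List.getElem_enumerate, PySem.Dict.getD_insert]

lemma pvFold2 (pairs : List (Int × Int)) (d : PySem.Dict Int Int) (w : List Int) :
    pairs.foldl pvStep2 (pvRow d w) = pvRow (pvInsertAll d pairs) w := by
  induction pairs generalizing d with
  | nil => rfl
  | cons q rest ih => simp only [List.foldl_cons, pvStep2_row, pvInsertAll] at ih ⊢; exact ih _

lemma pvRow_empty (w : List Int) : pvRow PySem.Dict.empty w = w := by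
  simp [pvRow, PySem.Dict.getD_empty, PySem.List.map_snd_enumerate]

lemma pvLen_mem_prodRep (n : Nat) (ps : List Int) (h : ps ∈ pvProdRep n) : ps.length = n := by
  induction n generalizing ps with
  | zero => simp [pvProdRep] at h; simp [h]
  | succ n ih =>
    simp [pvProdRep] at h
    rcases h with ⟨t, ht, rfl⟩ | ⟨t, ht, rfl⟩ <;> simp [ih _ ht]

-- bridge: the enumerate/index loop of A equals the zip loop
lemma pvEnumFold (idxs : List Int) (ps : List Int) (s : Nat) (w : List Int)
    (h : s + ps.length ≤ idxs.length) :
    (PySem.List.enumerate ps (s : Int)).foldl (pvAStep idxs) w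
      = ((idxs.drop s).zip ps).foldl pvStep2 w := by
  induction ps generalizing s w with
  | nil => simp [PySem.List.enumerate_nil, List.zip_nil_right]
  | cons p tl ih =>
    have hs : s < idxs.length := by simp at h; omega
    rw [PySem.List.enumerate_cons, List.foldl_cons]
    have hd : idxs.drop s = idxs[s] :: idxs.drop (s + 1) := (List.getElem_cons_drop hs).symm
    rw [hd, List.zip_cons_cons, List.foldl_cons]
    have hstep : pvAStep idxs w ((s : Int), p) = pvStep2 w (idxs[s], p) := by
      simp [pvAStep, pvStep2, PySem.List.pyGetD_natCast, List.getElem?_eq_getElem hs]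
    rw [hstep]
    have := ih (s + 1) (pvStep2 w (idxs[s], p)) (by simp at h ⊢; omega)
    rw [← this]
    norm_cast

lemma pvGo_eq (word : List Int) (rest : List Int) (assign : PySem.Dict Int Int) :
    pvGo word rest assign
      = (pvProdRep rest.length).map (fun ps => pvRow (pvInsertAll assign (rest.zip ps)) word) := by
  induction rest generalizing assign with
  | nil => simp [pvGo, pvProdRep, pvRow, pvInsertAll]
  | cons idx rest' ih =>
    simp only [pvGo, ih, List.length_cons, pvProdRep, List.flatMap_cons, List.flatMap_nil,
      List.map_append, List.map_map, List.append_nil]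
    rfl

-- ===== VERDICT (by name: the statement is the Claim_ definition above) =====
theorem get_word_combinations_spec : Claim_equal_get_word_combinations := by
  intro word idxs _
  unfold Spec_get_word_combinations
  unfold get_word_combinations get_word_combinations_alt
  rw [PySem.List.foldl_append_singleton_eq_map, pvGo_eq]
  apply List.map_congr_left
  intro ps hps
  have hlen : ps.length = idxs.length := pvLen_mem_prodRep _ _ hps
  have h0 : (PySem.List.enumerate ps (0 : Int)).foldl (pvAStep idxs) (word.map (fun s => s))
      = ((idxs.drop 0).zip ps).foldl pvStep2 (word.map (fun s => s)) := by
    have := pvEnumFold idxs ps 0 (word.map (fun s => s)) (by omega)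
    exact_mod_cast this
  rw [h0]
  simp only [List.drop_zero, List.map_id']
  conv_lhs => rw [← pvRow_empty word]
  exact pvFold2 _ _ _
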